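-- pv_equiv track=rewrite | github.com/jmrothberg/Games | Generated_games/lynx_sprite_extract.py | stitch_quads
-- ===== SOURCE A (Python) =====
-- def stitch_quads(quads):
--     """Compose up to 4 quadrants around a center using Suzy rotation order:
--     Q0=DR, Q1=UR, Q2=UL, Q3=DL. Each quadrant's [0,0] is the center pixel."""
--     n = len(quads)
--     W = [0, 0, 0, 0]; H = [0, 0, 0, 0]
--     for i in range(n):
--         H[i] = len(quads[i]); W[i] = len(quads[i][0]) if quads[i] else 0
--     right = max(W[0], W[1]); left = max(W[2], W[3])
--     down  = max(H[0], H[3]); up   = max(H[1], H[2])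
--     Wo = left + right; Ho = up + down
--     if Wo <= 0 or Ho <= 0:
--         return quads[0]
--     out = [[0] * Wo for _ in range(Ho)]
--     cx, cy = left, up
--     # Q0 DR
--     if n >= 1:
--         for y in range(H[0]):
--             for x in range(W[0]):
--                 out[cy + y][cx + x] = quads[0][y][x]
--     # Q1 UR (vflip)
--     if n >= 2:
--         for y in range(H[1]):
--             for x in range(W[1]):
--                 out[cy - 1 - y][cx + x] = quads[1][y][x]
--     # Q2 UL (both flipped)
--     if n >= 3:
--         for y in range(H[2]):
--             for x in range(W[2]):
--                 out[cy - 1 - y][cx - 1 - x] = quads[2][y][x]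
--     # Q3 DL (hflip)
--     if n >= 4:
--         for y in range(H[3]):
--             for x in range(W[3]):
--                 out[cy + y][cx - 1 - x] = quads[3][y][x]
--     return out
-- ===== SOURCE B (Python) =====
-- def stitch_quads(quads):
--     """Compose up to 4 quadrants around a center using Suzy rotation order:
--     Q0=DR, Q1=UR, Q2=UL, Q3=DL. Each quadrant's [0,0] is the center pixel."""
--     n = len(quads)
--     W = [0, 0, 0, 0]; H = [0, 0, 0, 0]
--     for i in range(n):
--         H[i] = len(quads[i]); W[i] = len(quads[i][0]) if quads[i] else 0
--     right = max(W[0], W[1]); left = max(W[2], W[3])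
--     down  = max(H[0], H[3]); up   = max(H[1], H[2])
--     Wo = left + right; Ho = up + down
--     if Wo <= 0 or Ho <= 0:
--         return quads[0]
--     cx, cy = left, up
--
--     def pix(oy, ox):
--         dy = oy - cy; dx = ox - cx
--         if dy >= 0 and dx >= 0:
--             q, y, x = 0, dy, dx
--         elif dy < 0 and dx >= 0:
--             q, y, x = 1, -1 - dy, dx
--         elif dy < 0:
--             q, y, x = 2, -1 - dy, -1 - dx
--         else:
--             q, y, x = 3, dy, -1 - dx
--         if q < n and y < H[q] and x < W[q]:
--             return quads[q][y][x]
--         return 0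
--
--     return [[pix(oy, ox) for ox in range(Wo)] for oy in range(Ho)]
-- ===== Notes on version B (the rewrite author's own statement) =====
-- stated objective: alternative
-- what changed: Replaces the four source-driven scatter loops that write each quadrant into a preallocated grid with a single output-driven gather pass: each output cell classifies its quadrant from the signs of its offsets to the center and reads the one source pixel (or 0) directly, so no mutable grid is built.
import Mathlib
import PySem

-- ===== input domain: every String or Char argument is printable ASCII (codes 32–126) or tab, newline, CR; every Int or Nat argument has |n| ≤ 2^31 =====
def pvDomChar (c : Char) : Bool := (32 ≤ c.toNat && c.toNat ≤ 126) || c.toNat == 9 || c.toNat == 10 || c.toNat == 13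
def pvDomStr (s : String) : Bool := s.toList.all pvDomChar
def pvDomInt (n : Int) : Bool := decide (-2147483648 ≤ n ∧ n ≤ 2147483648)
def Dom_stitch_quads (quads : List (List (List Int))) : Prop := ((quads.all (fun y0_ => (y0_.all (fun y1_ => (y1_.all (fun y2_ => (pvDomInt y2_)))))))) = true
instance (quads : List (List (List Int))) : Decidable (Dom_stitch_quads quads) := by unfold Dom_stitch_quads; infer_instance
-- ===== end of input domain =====

-- B replaces A's four scatter loops (writes into a preallocated mutable grid) by a single
-- output-driven gather pass computing each cell from the quadrant classification of its offsets;
-- objective: alternative decomposition, same asymptotic cost.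


-- shared preamble helper: the Python `for i in range(n): H[i]=len(quads[i]); W[i]=len(quads[i][0]) if quads[i] else 0`
-- (both A and B run this identical preamble; for i ≥ 4 the Python raises IndexError — outside Pre_ — the no-op set is exact inside Pre_)
def pvWHDims (quads : List (List (List Int))) : List Nat × List Nat :=
  (List.range quads.length).foldl
    (fun wh i =>
      let q := quads.getD i []
      (wh.1.set i (if q = [] then 0 else (q.getD 0 []).length), wh.2.set i q.length))
    ([0, 0, 0, 0], [0, 0, 0, 0])

-- ===== PORT A =====
-- `out[r][c] = v`: reads row r then sets element c; exact for in-range indices (only such writes occur inside Pre_)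
def pvSetCell (g : List (List Int)) (r c : Int) (v : Int) : List (List Int) :=
  PySem.List.pySetD g r (PySem.List.pySetD (PySem.List.pyGetD g r []) c v)

-- quadrant reads quads[q][y][x] use getD: indices are in range inside Pre_, so this is exact there
def stitch_quads (quads : List (List (List Int))) : List (List Int) :=
  let n := quads.length
  let WH := pvWHDims quads
  let W := WH.1
  let H := WH.2
  let right := max (W.getD 0 0) (W.getD 1 0)
  let left  := max (W.getD 2 0) (W.getD 3 0)
  let down  := max (H.getD 0 0) (H.getD 3 0)
  let up    := max (H.getD 1 0) (H.getD 2 0)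
  let Wo := left + right
  let Ho := up + down
  if Wo ≤ 0 ∨ Ho ≤ 0 then quads.getD 0 []   -- Python raises IndexError here when quads = [] (outside Pre_)
  else
    let out0 := List.replicate Ho (List.replicate Wo (0 : Int))
    let cx := left
    let cy := up
    let out1 := if 1 ≤ n then
        (List.range (H.getD 0 0)).foldl (fun out (y : Nat) =>
          (List.range (W.getD 0 0)).foldl (fun out (x : Nat) =>
            pvSetCell out ((cy : Int) + (y : Int)) ((cx : Int) + (x : Int)) (((quads.getD 0 []).getD y []).getD x 0)) out) out0
      else out0
    let out2 := if 2 ≤ n then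
        (List.range (H.getD 1 0)).foldl (fun out (y : Nat) =>
          (List.range (W.getD 1 0)).foldl (fun out (x : Nat) =>
            pvSetCell out ((cy : Int) - 1 - (y : Int)) ((cx : Int) + (x : Int)) (((quads.getD 1 []).getD y []).getD x 0)) out) out1
      else out1
    let out3 := if 3 ≤ n then
        (List.range (H.getD 2 0)).foldl (fun out (y : Nat) =>
          (List.range (W.getD 2 0)).foldl (fun out (x : Nat) =>
            pvSetCell out ((cy : Int) - 1 - (y : Int)) ((cx : Int) - 1 - (x : Int)) (((quads.getD 2 []).getD y []).getD x 0)) out) out2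
      else out2
    let out4 := if 4 ≤ n then
        (List.range (H.getD 3 0)).foldl (fun out (y : Nat) =>
          (List.range (W.getD 3 0)).foldl (fun out (x : Nat) =>
            pvSetCell out ((cy : Int) + (y : Int)) ((cx : Int) - 1 - (x : Int)) (((quads.getD 3 []).getD y []).getD x 0)) out) out3
      else out3
    out4

-- ===== PORT B =====
def stitch_quads_alt (quads : List (List (List Int))) : List (List Int) :=
  let n := quads.length
  let WH := pvWHDims quads
  let W := WH.1
  let H := WH.2
  let right := max (W.getD 0 0) (W.getD 1 0)
  let left  := max (W.getD 2 0) (W.getD 3 0)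
  let down  := max (H.getD 0 0) (H.getD 3 0)
  let up    := max (H.getD 1 0) (H.getD 2 0)
  let Wo := left + right
  let Ho := up + down
  if Wo ≤ 0 ∨ Ho ≤ 0 then quads.getD 0 []   -- Python raises IndexError here when quads = [] (outside Pre_)
  else
    let cx := left
    let cy := up
    (List.range Ho).map fun (oy : Nat) =>
      (List.range Wo).map fun (ox : Nat) =>
        let dy : Int := (oy : Int) - (cy : Int)
        let dx : Int := (ox : Int) - (cx : Int)
        let t : Nat × Int × Int :=
          if 0 ≤ dy ∧ 0 ≤ dx then (0, dy, dx)
          else if dy < 0 ∧ 0 ≤ dx then (1, -1 - dy, dx)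
          else if dy < 0 then (2, -1 - dy, -1 - dx)
          else (3, dy, -1 - dx)
        if t.1 < n ∧ t.2.1 < ((H.getD t.1 0 : Nat) : Int) ∧ t.2.2 < ((W.getD t.1 0 : Nat) : Int) then
          ((quads.getD t.1 []).getD t.2.1.toNat []).getD t.2.2.toNat 0
        else 0

-- ===== PRECONDITION & SPEC =====
-- Pre_ excludes exactly the inputs on which Python A raises IndexError: an empty quads list or more
-- than 4 quadrants (the H[i]/W[i] assignments go out of range, or the degenerate return quads[0]),
-- and ragged quadrants with some row shorter than row 0 (the scatter loop reads past that row's end).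
def Pre_stitch_quads (quads : List (List (List Int))) : Prop :=
  1 ≤ quads.length ∧ quads.length ≤ 4 ∧
    ∀ q ∈ quads, ∀ row ∈ q, (q.getD 0 []).length ≤ row.length
instance (quads : List (List (List Int))) : Decidable (Pre_stitch_quads quads) := by
  unfold Pre_stitch_quads; infer_instance
def pvWitness_stitch_quads : List (List (List Int)) := [[[1, 2], [3, 4]], [[5]]]

def Spec_stitch_quads (quads : List (List (List Int))) (out : List (List Int)) : Prop := out = stitch_quads_alt quads
instance (quads : List (List (List Int))) (out : List (List Int)) : Decidable (Spec_stitch_quads quads out) := by unfold Spec_stitch_quads; infer_instance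

-- ===== CLAIM (what is proved, stated in full; the proofs are below) =====
def Claim_equal_stitch_quads : Prop := ∀ (quads : List (List (List Int))), Dom_stitch_quads quads → Pre_stitch_quads quads → Spec_stitch_quads quads (stitch_quads quads)

-- ===== LEMMAS AND PROOFS =====

def pvSetCellN (g : List (List Int)) (r c : Nat) (v : Int) : List (List Int) :=
  g.set r ((g.getD r []).set c v)

def pvGetCell (g : List (List Int)) (r c : Nat) : Int := (g.getD r []).getD c 0

theorem pvSetCell_eq_N (g : List (List Int)) (r c : Int) (v : Int) (hr : 0 ≤ r) (hc : 0 ≤ c) :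
    pvSetCell g r c v = pvSetCellN g r.toNat c.toNat v := by
  lift r to ℕ using hr
  lift c to ℕ using hc
  simp [pvSetCell, pvSetCellN]

theorem length_pvSetCellN (g : List (List Int)) (r c : Nat) (v : Int) :
    (pvSetCellN g r c v).length = g.length := by
  simp [pvSetCellN]

theorem rows_pvSetCellN (g : List (List Int)) (r c : Nat) (v : Int) (Wo : Nat)
    (hr : r < g.length) (hrow : ∀ row ∈ g, row.length = Wo) :
    ∀ row ∈ pvSetCellN g r c v, row.length = Wo := by
  intro row hm
  rcases List.mem_or_eq_of_mem_set hm with h | h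
  · exact hrow _ h
  · subst h
    simp only [List.length_set]
    exact hrow _ (by rw [List.getD_eq_getElem _ _ hr]; exact List.getElem_mem hr)

theorem pvRow_mem (g : List (List Int)) (r : Nat) (hr : r < g.length) : g.getD r [] ∈ g := by
  rw [List.getD_eq_getElem _ _ hr]; exact List.getElem_mem hr

theorem pvGetD_set {α : Type} (l : List α) (i : Nat) (a d : α) (j : Nat) (hi : i < l.length) :
    (l.set i a).getD j d = if j = i then a else l.getD j d := by
  rcases eq_or_ne j i with h | h
  · subst h
    rw [List.getD_eq_getElem?_getD, List.getElem?_set_self hi, Option.getD_some, if_pos rfl]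
  · rw [List.getD_eq_getElem?_getD, List.getElem?_set_ne (Ne.symm h),
      ← List.getD_eq_getElem?_getD, if_neg h]

theorem pvGetCell_set (g : List (List Int)) (r c : Nat) (v : Int)
    (hr : r < g.length) (hc : c < (g.getD r []).length) (r' c' : Nat) :
    pvGetCell (pvSetCellN g r c v) r' c' =
      if r' = r ∧ c' = c then v else pvGetCell g r' c' := by
  unfold pvGetCell pvSetCellN
  rw [pvGetD_set _ _ _ _ _ hr]
  by_cases h1 : r' = r
  · subst h1
    rw [if_pos rfl, pvGetD_set _ _ _ _ _ hc]
    by_cases h2 : c' = c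
    · rw [if_pos h2, if_pos ⟨rfl, h2⟩]
    · rw [if_neg h2, if_neg (by tauto)]
  · rw [if_neg h1, if_neg (by tauto)]

theorem inner_fold (Ho Wo : Nat) (ρ : Int) (γ : Nat → Int) (invγ : Nat → Nat) (vf : Nat → Int)
    (Wq : Nat)
    (hρ0 : 0 ≤ ρ) (hρ : ρ.toNat < Ho)
    (hγ : ∀ x, x < Wq → 0 ≤ γ x ∧ (γ x).toNat < Wo)
    (hinv : ∀ x, x < Wq → invγ (γ x).toNat = x)
    (g : List (List Int)) (hg : g.length = Ho) (hrow : ∀ row ∈ g, row.length = Wo) :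
    ((List.range Wq).foldl (fun out x => pvSetCell out ρ (γ x) (vf x)) g).length = Ho ∧
    (∀ row ∈ (List.range Wq).foldl (fun out x => pvSetCell out ρ (γ x) (vf x)) g, row.length = Wo) ∧
    ∀ r c : Nat, pvGetCell ((List.range Wq).foldl (fun out x => pvSetCell out ρ (γ x) (vf x)) g) r c =
      if r = ρ.toNat ∧ ∃ x, x < Wq ∧ (γ x).toNat = c then vf (invγ c) else pvGetCell g r c := by
  induction Wq with
  | zero =>
    refine ⟨hg, hrow, fun r c => ?_⟩
    simp
  | succ W ih =>
    obtain ⟨ihl, ihr, ihc⟩ := ih (fun x hx => hγ x (by omega)) (fun x hx => hinv x (by omega))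
    rw [List.range_succ, List.foldl_append, List.foldl_cons, List.foldl_nil]
    rw [pvSetCell_eq_N _ _ _ _ hρ0 (hγ W (by omega)).1]
    set F := (List.range W).foldl (fun out x => pvSetCell out ρ (γ x) (vf x)) g with hF
    have hrF : ρ.toNat < F.length := by omega
    have hcF : (γ W).toNat < (F.getD ρ.toNat []).length := by
      rw [ihr _ (pvRow_mem _ _ hrF)]; exact (hγ W (by omega)).2
    refine ⟨by rw [length_pvSetCellN]; omega,
      rows_pvSetCellN _ _ _ _ _ hrF ihr, fun r c => ?_⟩
    rw [pvGetCell_set _ _ _ _ hrF hcF]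
    by_cases h1 : r = ρ.toNat
    · subst h1
      by_cases h2 : c = (γ W).toNat
      · subst h2
        rw [if_pos ⟨rfl, rfl⟩, if_pos ⟨rfl, W, by omega, rfl⟩, hinv W (by omega)]
      · rw [if_neg (by tauto), ihc]
        have : (∃ x, x < W ∧ (γ x).toNat = c) ↔ (∃ x, x < W + 1 ∧ (γ x).toNat = c) := by
          constructor
          · rintro ⟨x, hx, he⟩; exact ⟨x, by omega, he⟩
          · rintro ⟨x, hx, he⟩
            refine ⟨x, ?_, he⟩
            rcases Nat.lt_succ_iff_lt_or_eq.1 hx with h | h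
            · exact h
            · exact absurd (h ▸ he).symm h2
        simp only [this]
    · rw [if_neg (by tauto), ihc, if_neg (by tauto), if_neg (by tauto)]
theorem outer_fold (Ho Wo : Nat) (ρf : Nat → Int) (invρ : Nat → Nat) (γ : Nat → Int)
    (invγ : Nat → Nat) (vf : Nat → Nat → Int) (Hq Wq : Nat)
    (hρ : ∀ y, y < Hq → 0 ≤ ρf y ∧ (ρf y).toNat < Ho)
    (hρinv : ∀ y, y < Hq → invρ (ρf y).toNat = y)
    (hγ : ∀ x, x < Wq → 0 ≤ γ x ∧ (γ x).toNat < Wo)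
    (hγinv : ∀ x, x < Wq → invγ (γ x).toNat = x)
    (g : List (List Int)) (hg : g.length = Ho) (hrow : ∀ row ∈ g, row.length = Wo) :
    ((List.range Hq).foldl (fun out y => (List.range Wq).foldl
        (fun out x => pvSetCell out (ρf y) (γ x) (vf y x)) out) g).length = Ho ∧
    (∀ row ∈ (List.range Hq).foldl (fun out y => (List.range Wq).foldl
        (fun out x => pvSetCell out (ρf y) (γ x) (vf y x)) out) g, row.length = Wo) ∧
    ∀ r c : Nat, pvGetCell ((List.range Hq).foldl (fun out y => (List.range Wq).foldl
        (fun out x => pvSetCell out (ρf y) (γ x) (vf y x)) out) g) r c =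
      if (∃ y, y < Hq ∧ (ρf y).toNat = r) ∧ ∃ x, x < Wq ∧ (γ x).toNat = c then
        vf (invρ r) (invγ c)
      else pvGetCell g r c := by
  induction Hq with
  | zero =>
    refine ⟨hg, hrow, fun r c => ?_⟩
    simp
  | succ Hq ih =>
    obtain ⟨ihl, ihr, ihc⟩ := ih (fun y hy => hρ y (by omega)) (fun y hy => hρinv y (by omega))
    rw [List.range_succ, List.foldl_append, List.foldl_cons, List.foldl_nil]
    set G := (List.range Hq).foldl (fun out y => (List.range Wq).foldl
        (fun out x => pvSetCell out (ρf y) (γ x) (vf y x)) out) g with hG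
    obtain ⟨il, ir, ic⟩ := inner_fold Ho Wo (ρf Hq) γ invγ (vf Hq) Wq
      (hρ Hq (by omega)).1 (hρ Hq (by omega)).2 hγ hγinv G ihl ihr
    refine ⟨il, ir, fun r c => ?_⟩
    rw [ic]
    by_cases h1 : r = (ρf Hq).toNat
    · subst h1
      by_cases h2 : ∃ x, x < Wq ∧ (γ x).toNat = c
      · rw [if_pos ⟨rfl, h2⟩, if_pos ⟨⟨Hq, by omega, rfl⟩, h2⟩, hρinv Hq (by omega)]
      · rw [if_neg (fun h => h2 h.2), ihc, if_neg (fun h => h2 h.2), if_neg (fun h => h2 h.2)]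
    · rw [if_neg (fun h => h1 h.1), ihc]
      have : (∃ y, y < Hq ∧ (ρf y).toNat = r) ↔ (∃ y, y < Hq + 1 ∧ (ρf y).toNat = r) := by
        constructor
        · rintro ⟨y, hy, he⟩; exact ⟨y, by omega, he⟩
        · rintro ⟨y, hy, he⟩
          refine ⟨y, ?_, he⟩
          rcases Nat.lt_succ_iff_lt_or_eq.1 hy with h | h
          · exact h
          · exact absurd (h ▸ he).symm h1
      simp only [this]
def pvw (quads : List (List (List Int))) (i : Nat) : Nat :=
  if quads.getD i [] = [] then 0 else ((quads.getD i []).getD 0 []).length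

def pvh (quads : List (List (List Int))) (i : Nat) : Nat := (quads.getD i []).length

theorem pvWHDims_eq (quads : List (List (List Int))) (h4 : quads.length ≤ 4) :
    pvWHDims quads = ([pvw quads 0, pvw quads 1, pvw quads 2, pvw quads 3],
      [pvh quads 0, pvh quads 1, pvh quads 2, pvh quads 3]) := by
  rcases quads with _ | ⟨a, _ | ⟨b, _ | ⟨c, _ | ⟨d, _ | ⟨e, t⟩⟩⟩⟩⟩
  · simp [pvWHDims, pvw, pvh]
  · simp [pvWHDims, pvw, pvh, List.range_succ]
  · simp [pvWHDims, pvw, pvh, List.range_succ]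
  · simp [pvWHDims, pvw, pvh, List.range_succ]
  · simp [pvWHDims, pvw, pvh, List.range_succ]
  · simp at h4; omega

theorem pvh_len (quads : List (List (List Int))) (q : Nat) (h : quads.length ≤ q) :
    pvh quads q = 0 := by
  unfold pvh
  rw [List.getD_eq_default _ _ h]
  rfl

theorem ex_plus (b H r : Nat) :
    (∃ y, y < H ∧ ((b : Int) + ↑y).toNat = r) ↔ (b ≤ r ∧ r < b + H) := by
  constructor
  · rintro ⟨y, hy, he⟩; omega
  · intro h; exact ⟨r - b, by omega, by omega⟩

theorem ex_mirror (b H r : Nat) (hHb : H ≤ b) :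
    (∃ y, y < H ∧ ((b : Int) - 1 - ↑y).toNat = r) ↔ (r < b ∧ b ≤ r + H) := by
  constructor
  · rintro ⟨y, hy, he⟩; omega
  · intro h; exact ⟨b - 1 - r, by omega, by omega⟩

theorem pvGetCell_replicate (Ho Wo : Nat) (r c : Nat) :
    pvGetCell (List.replicate Ho (List.replicate Wo (0 : Int))) r c = 0 := by
  have inner : ∀ n : Nat, (List.replicate n (0 : Int)).getD c 0 = 0 := by
    intro n
    rcases Nat.lt_or_ge c n with h | h
    · rw [List.getD_eq_getElem (List.replicate n 0) 0 (by simpa using h), List.getElem_replicate]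
    · rw [List.getD_eq_default (List.replicate n 0) 0 (by simpa using h)]
  have hrow : (List.replicate Ho (List.replicate Wo (0 : Int))).getD r [] = List.replicate Wo 0 ∨
      (List.replicate Ho (List.replicate Wo (0 : Int))).getD r [] = [] := by
    rcases Nat.lt_or_ge r Ho with h | h
    · left
      rw [List.getD_eq_getElem _ _ (by simpa using h), List.getElem_replicate]
    · right
      exact List.getD_eq_default _ _ (by simpa using h)
  unfold pvGetCell
  rcases hrow with h | h <;> rw [h]
  · exact inner Wo
  · exact inner 0

theorem pvGetCell_eq_getElem (g : List (List Int)) (r c : Nat) (hr : r < g.length)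
    (hc : c < g[r].length) : pvGetCell g r c = g[r][c] := by
  unfold pvGetCell
  rw [List.getD_eq_getElem _ _ hr, List.getD_eq_getElem _ _ hc]

theorem grid_ext (g : List (List Int)) (Ho Wo : Nat) (hl : g.length = Ho)
    (hrow : ∀ row ∈ g, row.length = Wo) (f : Nat → Nat → Int)
    (hcell : ∀ r c : Nat, r < Ho → c < Wo → pvGetCell g r c = f r c) :
    g = (List.range Ho).map (fun oy => (List.range Wo).map (fun ox => f oy ox)) := by
  refine List.ext_getElem (by simp [hl]) ?_
  intro r hr hr'
  refine List.ext_getElem (by rw [hrow _ (List.getElem_mem hr)]; simp) ?_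
  intro c hc hc'
  simp only [List.getElem_map, List.getElem_range]
  rw [← pvGetCell_eq_getElem g r c hr hc]
  exact hcell r c (by omega) (by rw [hrow _ (List.getElem_mem hr)] at hc; exact hc)

-- ===== VERDICT (by name: the statement is the Claim_ definition above) =====
set_option maxHeartbeats 2000000 in
theorem stitch_quads_spec : Claim_equal_stitch_quads := by
  intro quads _dom hpre
  obtain ⟨hn1, hn4, hrect⟩ := hpre
  show stitch_quads quads = stitch_quads_alt quads
  simp only [stitch_quads, stitch_quads_alt]
  have hW0 : (pvWHDims quads).1.getD 0 0 = pvw quads 0 := by rw [pvWHDims_eq quads hn4]; rfl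
  have hW1 : (pvWHDims quads).1.getD 1 0 = pvw quads 1 := by rw [pvWHDims_eq quads hn4]; rfl
  have hW2 : (pvWHDims quads).1.getD 2 0 = pvw quads 2 := by rw [pvWHDims_eq quads hn4]; rfl
  have hW3 : (pvWHDims quads).1.getD 3 0 = pvw quads 3 := by rw [pvWHDims_eq quads hn4]; rfl
  have hH0 : (pvWHDims quads).2.getD 0 0 = pvh quads 0 := by rw [pvWHDims_eq quads hn4]; rfl
  have hH1 : (pvWHDims quads).2.getD 1 0 = pvh quads 1 := by rw [pvWHDims_eq quads hn4]; rfl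
  have hH2 : (pvWHDims quads).2.getD 2 0 = pvh quads 2 := by rw [pvWHDims_eq quads hn4]; rfl
  have hH3 : (pvWHDims quads).2.getD 3 0 = pvh quads 3 := by rw [pvWHDims_eq quads hn4]; rfl
  rw [hW0, hW1, hW2, hW3, hH0, hH1, hH2, hH3]
  set R := max (pvw quads 0) (pvw quads 1) with hR
  set L := max (pvw quads 2) (pvw quads 3) with hL
  set D := max (pvh quads 0) (pvh quads 3) with hD
  set U := max (pvh quads 1) (pvh quads 2) with hU
  by_cases hdeg : (L + R ≤ 0 ∨ U + D ≤ 0)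
  · rw [if_pos hdeg, if_pos hdeg]
  · rw [if_neg hdeg, if_neg hdeg, if_pos hn1]
    set g0 := List.replicate (U + D) (List.replicate (L + R) (0 : Int)) with hg0
    set g1 := List.foldl (fun out (y : Nat) => List.foldl (fun out (x : Nat) =>
      pvSetCell out ((U : Int) + (y : Int)) ((L : Int) + (x : Int))
        (((quads.getD 0 []).getD y []).getD x 0)) out (List.range (pvw quads 0))) g0
      (List.range (pvh quads 0)) with hg1
    set g2 := (if 2 ≤ quads.length then List.foldl (fun out (y : Nat) => List.foldl (fun out (x : Nat) =>
      pvSetCell out ((U : Int) - 1 - (y : Int)) ((L : Int) + (x : Int))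
        (((quads.getD 1 []).getD y []).getD x 0)) out (List.range (pvw quads 1))) g1
      (List.range (pvh quads 1)) else g1) with hg2
    set g3 := (if 3 ≤ quads.length then List.foldl (fun out (y : Nat) => List.foldl (fun out (x : Nat) =>
      pvSetCell out ((U : Int) - 1 - (y : Int)) ((L : Int) - 1 - (x : Int))
        (((quads.getD 2 []).getD y []).getD x 0)) out (List.range (pvw quads 2))) g2
      (List.range (pvh quads 2)) else g2) with hg3
    set g4 := (if 4 ≤ quads.length then List.foldl (fun out (y : Nat) => List.foldl (fun out (x : Nat) =>
      pvSetCell out ((U : Int) + (y : Int)) ((L : Int) - 1 - (x : Int))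
        (((quads.getD 3 []).getD y []).getD x 0)) out (List.range (pvw quads 3))) g3
      (List.range (pvh quads 3)) else g3) with hg4
    have hw0R : pvw quads 0 ≤ R := le_max_left _ _
    have hw1R : pvw quads 1 ≤ R := le_max_right _ _
    have hw2L : pvw quads 2 ≤ L := le_max_left _ _
    have hw3L : pvw quads 3 ≤ L := le_max_right _ _
    have hh0D : pvh quads 0 ≤ D := le_max_left _ _
    have hh3D : pvh quads 3 ≤ D := le_max_right _ _
    have hh1U : pvh quads 1 ≤ U := le_max_left _ _
    have hh2U : pvh quads 2 ≤ U := le_max_right _ _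
    have S1 : g1.length = U + D ∧ (∀ row ∈ g1, row.length = L + R) ∧
        ∀ r c : Nat, pvGetCell g1 r c =
          if (∃ y, y < pvh quads 0 ∧ ((U : Int) + (y : Int)).toNat = r) ∧
             (∃ x, x < pvw quads 0 ∧ ((L : Int) + (x : Int)).toNat = c) then
            ((quads.getD 0 []).getD (r - U) []).getD (c - L) 0
          else pvGetCell g0 r c := by
      rw [hg1]
      exact outer_fold (U + D) (L + R) (fun y => (U : Int) + (y : Int)) (fun r => r - U)
        (fun x => (L : Int) + (x : Int)) (fun c => c - L)
        (fun (y x : Nat) => ((quads.getD 0 []).getD y []).getD x 0) (pvh quads 0) (pvw quads 0)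
        (by intro y hy; have e1 : (0 : Int) ≤ (U : Int) + (y : Int) := (by omega); have e2 : ((U : Int) + (y : Int)).toNat < U + D := (by omega); exact ⟨e1, e2⟩)
        (by intro y hy; have e3 : ((U : Int) + (y : Int)).toNat - U = y := (by omega); exact e3)
        (by intro x hx; have e1 : (0 : Int) ≤ (L : Int) + (x : Int) := (by omega); have e2 : ((L : Int) + (x : Int)).toNat < L + R := (by omega); exact ⟨e1, e2⟩)
        (by intro x hx; have e3 : ((L : Int) + (x : Int)).toNat - L = x := (by omega); exact e3)
        g0 (by rw [hg0]; simp)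
        (by rw [hg0]; intro row hm; rw [List.eq_of_mem_replicate hm]; simp)
    obtain ⟨l1, r1, c1⟩ := S1
    have S2 : g2.length = U + D ∧ (∀ row ∈ g2, row.length = L + R) ∧
        ∀ r c : Nat, pvGetCell g2 r c =
          if (∃ y, y < pvh quads 1 ∧ ((U : Int) - 1 - (y : Int)).toNat = r) ∧
             (∃ x, x < pvw quads 1 ∧ ((L : Int) + (x : Int)).toNat = c) then
            ((quads.getD 1 []).getD (U - 1 - r) []).getD (c - L) 0
          else pvGetCell g1 r c := by
      rw [hg2]
      by_cases hk : 2 ≤ quads.length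
      · rw [if_pos hk]
        exact outer_fold (U + D) (L + R) (fun y => (U : Int) - 1 - (y : Int)) (fun r => U - 1 - r)
          (fun x => (L : Int) + (x : Int)) (fun c => c - L)
          (fun (y x : Nat) => ((quads.getD 1 []).getD y []).getD x 0) (pvh quads 1) (pvw quads 1)
          (by intro y hy; have e1 : (0 : Int) ≤ (U : Int) - 1 - (y : Int) := (by omega); have e2 : ((U : Int) - 1 - (y : Int)).toNat < U + D := (by omega); exact ⟨e1, e2⟩)
          (by intro y hy; have e3 : U - 1 - ((U : Int) - 1 - (y : Int)).toNat = y := (by omega); exact e3)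
          (by intro x hx; have e1 : (0 : Int) ≤ (L : Int) + (x : Int) := (by omega); have e2 : ((L : Int) + (x : Int)).toNat < L + R := (by omega); exact ⟨e1, e2⟩)
          (by intro x hx; have e3 : ((L : Int) + (x : Int)).toNat - L = x := (by omega); exact e3)
          g1 l1 r1
      · rw [if_neg hk]
        have hz : pvh quads 1 = 0 := pvh_len _ _ (by omega)
        refine ⟨l1, r1, fun r c => ?_⟩
        rw [if_neg]
        rintro ⟨⟨y, hy, -⟩, -⟩; omega
    obtain ⟨l2, r2, c2⟩ := S2
    have S3 : g3.length = U + D ∧ (∀ row ∈ g3, row.length = L + R) ∧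
        ∀ r c : Nat, pvGetCell g3 r c =
          if (∃ y, y < pvh quads 2 ∧ ((U : Int) - 1 - (y : Int)).toNat = r) ∧
             (∃ x, x < pvw quads 2 ∧ ((L : Int) - 1 - (x : Int)).toNat = c) then
            ((quads.getD 2 []).getD (U - 1 - r) []).getD (L - 1 - c) 0
          else pvGetCell g2 r c := by
      rw [hg3]
      by_cases hk : 3 ≤ quads.length
      · rw [if_pos hk]
        exact outer_fold (U + D) (L + R) (fun y => (U : Int) - 1 - (y : Int)) (fun r => U - 1 - r)
          (fun x => (L : Int) - 1 - (x : Int)) (fun c => L - 1 - c)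
          (fun (y x : Nat) => ((quads.getD 2 []).getD y []).getD x 0) (pvh quads 2) (pvw quads 2)
          (by intro y hy; have e1 : (0 : Int) ≤ (U : Int) - 1 - (y : Int) := (by omega); have e2 : ((U : Int) - 1 - (y : Int)).toNat < U + D := (by omega); exact ⟨e1, e2⟩)
          (by intro y hy; have e3 : U - 1 - ((U : Int) - 1 - (y : Int)).toNat = y := (by omega); exact e3)
          (by intro x hx; have e1 : (0 : Int) ≤ (L : Int) - 1 - (x : Int) := (by omega); have e2 : ((L : Int) - 1 - (x : Int)).toNat < L + R := (by omega); exact ⟨e1, e2⟩)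
          (by intro x hx; have e3 : L - 1 - ((L : Int) - 1 - (x : Int)).toNat = x := (by omega); exact e3)
          g2 l2 r2
      · rw [if_neg hk]
        have hz : pvh quads 2 = 0 := pvh_len _ _ (by omega)
        refine ⟨l2, r2, fun r c => ?_⟩
        rw [if_neg]
        rintro ⟨⟨y, hy, -⟩, -⟩; omega
    obtain ⟨l3, r3, c3⟩ := S3
    have S4 : g4.length = U + D ∧ (∀ row ∈ g4, row.length = L + R) ∧
        ∀ r c : Nat, pvGetCell g4 r c =
          if (∃ y, y < pvh quads 3 ∧ ((U : Int) + (y : Int)).toNat = r) ∧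
             (∃ x, x < pvw quads 3 ∧ ((L : Int) - 1 - (x : Int)).toNat = c) then
            ((quads.getD 3 []).getD (r - U) []).getD (L - 1 - c) 0
          else pvGetCell g3 r c := by
      rw [hg4]
      by_cases hk : 4 ≤ quads.length
      · rw [if_pos hk]
        exact outer_fold (U + D) (L + R) (fun y => (U : Int) + (y : Int)) (fun r => r - U)
          (fun x => (L : Int) - 1 - (x : Int)) (fun c => L - 1 - c)
          (fun (y x : Nat) => ((quads.getD 3 []).getD y []).getD x 0) (pvh quads 3) (pvw quads 3)
          (by intro y hy; have e1 : (0 : Int) ≤ (U : Int) + (y : Int) := (by omega); have e2 : ((U : Int) + (y : Int)).toNat < U + D := (by omega); exact ⟨e1, e2⟩)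
          (by intro y hy; have e3 : ((U : Int) + (y : Int)).toNat - U = y := (by omega); exact e3)
          (by intro x hx; have e1 : (0 : Int) ≤ (L : Int) - 1 - (x : Int) := (by omega); have e2 : ((L : Int) - 1 - (x : Int)).toNat < L + R := (by omega); exact ⟨e1, e2⟩)
          (by intro x hx; have e3 : L - 1 - ((L : Int) - 1 - (x : Int)).toNat = x := (by omega); exact e3)
          g3 l3 r3
      · rw [if_neg hk]
        have hz : pvh quads 3 = 0 := pvh_len _ _ (by omega)
        refine ⟨l3, r3, fun r c => ?_⟩
        rw [if_neg]
        rintro ⟨⟨y, hy, -⟩, -⟩; omega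
    obtain ⟨l4, r4, c4⟩ := S4
    clear hg1 hg2 hg3 hg4
    clear_value g1 g2 g3 g4
    refine grid_ext g4 (U + D) (L + R) l4 r4 _ ?_
    intro r c hrN hcN
    rw [c4, c3, c2, c1, pvGetCell_replicate]
    simp only [ex_plus U (pvh quads 0) r, ex_plus U (pvh quads 3) r,
      ex_mirror U (pvh quads 1) r hh1U, ex_mirror U (pvh quads 2) r hh2U,
      ex_plus L (pvw quads 0) c, ex_plus L (pvw quads 1) c,
      ex_mirror L (pvw quads 2) c hw2L, ex_mirror L (pvw quads 3) c hw3L]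
    rcases Nat.lt_or_ge r U with hrU | hrU <;> rcases Nat.lt_or_ge c L with hcL | hcL
    · -- r < U, c < L : quadrant 2 (UL)
      rw [if_neg (by omega : ¬((0:Int) ≤ (r : Int) - (U : Int) ∧ (0:Int) ≤ (c : Int) - (L : Int))),
        if_neg (by omega : ¬((r : Int) - (U : Int) < 0 ∧ (0:Int) ≤ (c : Int) - (L : Int))),
        if_pos (by omega : (r : Int) - (U : Int) < 0)]
      dsimp only
      rw [hH2, hW2]
      rw [show (-1 - ((r : Int) - (U : Int))).toNat = U - 1 - r from by omega,
        show (-1 - ((c : Int) - (L : Int))).toNat = L - 1 - c from by omega]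
      by_cases hq : 0 < pvh quads 2
      · have hqn : 2 < quads.length := by
          by_contra hh
          have := pvh_len quads 2 (by omega)
          omega
        split_ifs <;> first | rfl | omega
      · have hq0 : pvh quads 2 = 0 := by omega
        split_ifs <;> first | rfl | omega
    · -- r < U, c ≥ L : quadrant 1 (UR)
      rw [if_neg (by omega : ¬((0:Int) ≤ (r : Int) - (U : Int) ∧ (0:Int) ≤ (c : Int) - (L : Int))),
        if_pos (by omega : (r : Int) - (U : Int) < 0 ∧ (0:Int) ≤ (c : Int) - (L : Int))]
      dsimp only
      rw [hH1, hW1]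
      rw [show (-1 - ((r : Int) - (U : Int))).toNat = U - 1 - r from by omega,
        show ((c : Int) - (L : Int)).toNat = c - L from by omega]
      by_cases hq : 0 < pvh quads 1
      · have hqn : 1 < quads.length := by
          by_contra hh
          have := pvh_len quads 1 (by omega)
          omega
        split_ifs <;> first | rfl | omega
      · have hq0 : pvh quads 1 = 0 := by omega
        split_ifs <;> first | rfl | omega
    · -- r ≥ U, c < L : quadrant 3 (DL)
      rw [if_neg (by omega : ¬((0:Int) ≤ (r : Int) - (U : Int) ∧ (0:Int) ≤ (c : Int) - (L : Int))),
        if_neg (by omega : ¬((r : Int) - (U : Int) < 0 ∧ (0:Int) ≤ (c : Int) - (L : Int))),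
        if_neg (by omega : ¬((r : Int) - (U : Int) < 0))]
      dsimp only
      rw [hH3, hW3]
      rw [show ((r : Int) - (U : Int)).toNat = r - U from by omega,
        show (-1 - ((c : Int) - (L : Int))).toNat = L - 1 - c from by omega]
      by_cases hq : 0 < pvh quads 3
      · have hqn : 3 < quads.length := by
          by_contra hh
          have := pvh_len quads 3 (by omega)
          omega
        split_ifs <;> first | rfl | omega
      · have hq0 : pvh quads 3 = 0 := by omega
        split_ifs <;> first | rfl | omega
    · -- r ≥ U, c ≥ L : quadrant 0 (DR)
      rw [if_pos (by omega : (0:Int) ≤ (r : Int) - (U : Int) ∧ (0:Int) ≤ (c : Int) - (L : Int))]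
      dsimp only
      rw [hH0, hW0]
      rw [show ((r : Int) - (U : Int)).toNat = r - U from by omega,
        show ((c : Int) - (L : Int)).toNat = c - L from by omega]
      split_ifs <;> first | rfl | omega
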